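-- pv_equiv track=rewrite | github.com/raberin/hackerrank-questions | PY/array_subsets.py | subsetA_sort
-- ===== SOURCE A (Python) =====
-- def subsetA_sort(arr):
--     # Sort arr
--     sorted_arr = sorted(arr)
--     # Store biggest in subset_a
--     subset_a = []
--     sorted_arr_sum = sum(sorted_arr)
--     subset_a_sum = 0
--     while subset_a_sum <= sorted_arr_sum:
--         # Pop value from sorted_arr
--         popped = sorted_arr.pop()
--         # Add popped into subset_a and add to subset_a_sum
--         subset_a_sum += popped
--         subset_a.append(popped)
--         # Subtract popped from sum
--         sorted_arr_sum -= popped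
--     return subset_a
-- ===== SOURCE B (Python) =====
-- def subsetA_sort(arr):
--     # Different decomposition: compute the total once, sort descending, find the
--     # cut index k with a single accumulator, and return the slice desc[:k]
--     # (no mutation, no pops, no second running sum).
--     total = sum(arr)
--     desc = sorted(arr, reverse=True)
--     acc = 0
--     k = 0
--     while 2 * acc <= total:
--         acc += desc[k]
--         k += 1
--     return desc[:k]
-- ===== Notes on version B (the rewrite author's own statement) =====
-- stated objective: simpler
-- what changed: B sorts descending and finds the cut index with one accumulator and the condition 2*acc <= total, returning a slice desc[:k], instead of A's ascending sort with repeated pop(), an appended output list and two mutually-updated running sums.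
import Mathlib
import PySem

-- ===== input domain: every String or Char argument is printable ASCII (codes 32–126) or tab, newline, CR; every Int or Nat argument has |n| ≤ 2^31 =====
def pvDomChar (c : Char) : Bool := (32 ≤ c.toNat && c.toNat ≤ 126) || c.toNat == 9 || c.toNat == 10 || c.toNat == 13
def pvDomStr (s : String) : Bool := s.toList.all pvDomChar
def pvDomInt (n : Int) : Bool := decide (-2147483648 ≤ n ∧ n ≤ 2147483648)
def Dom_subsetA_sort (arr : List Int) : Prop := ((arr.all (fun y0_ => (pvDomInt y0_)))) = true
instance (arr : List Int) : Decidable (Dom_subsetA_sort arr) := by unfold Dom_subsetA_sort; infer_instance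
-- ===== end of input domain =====

-- B replaces A's ascending sort + pop()/append loop with two running sums by a
-- descending sort, a single-accumulator scan for the cut index k, and a slice
-- desc[:k] (objective: simpler; same O(n log n) cost).

-- ===== PORT A =====
-- the while loop: state = (mutable sorted_arr, subset_a, sorted_arr_sum, subset_a_sum)
def subsetA_sortGo (sorted_arr subset_a : List Int) (s_sum a_sum : Int) : List Int :=
  if a_sum ≤ s_sum then
    match h : PySem.List.pop? sorted_arr (-1) with
    | none => subset_a  -- IndexError: pop from empty list (excluded by Pre_)
    | some pr =>
      subsetA_sortGo pr.2 (subset_a ++ [pr.1]) (s_sum - pr.1) (a_sum + pr.1)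
  else subset_a
termination_by sorted_arr.length
decreasing_by
  have := PySem.List.length_of_pop?_eq_some sorted_arr h
  omega

def subsetA_sort (arr : List Int) : List Int :=
  let sorted_arr := PySem.List.sorted arr (fun x => x) false
  subsetA_sortGo sorted_arr [] sorted_arr.sum 0

-- ===== PORT B =====
-- the while loop of Source B: state = (acc, k); desc[k] via pyGet? (none = IndexError)
def subsetA_altGo (desc : List Int) (total acc : Int) (k : Nat) : Nat :=
  if 2 * acc ≤ total then
    match h : PySem.List.pyGet? desc (k : Int) with
    | none => k  -- IndexError (excluded by Pre_)
    | some v => subsetA_altGo desc total (acc + v) (k + 1)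
  else k
termination_by desc.length - k
decreasing_by
  have hk : k < desc.length := by
    by_contra hk
    rw [PySem.List.pyGet?_natCast, List.getElem?_eq_none (by omega)] at h
    simp at h
  omega

def subsetA_sort_alt (arr : List Int) : List Int :=
  let total := arr.sum
  let desc := PySem.List.sorted arr (fun x => x) true
  PySem.List.slice desc none (some ((subsetA_altGo desc total 0 0 : Nat) : Int))

-- ===== PRECONDITION & SPEC =====
-- Pre_ excludes lists whose elements are all zero (including []): there the
-- Python A exhausts the list and raises IndexError (so does B).
def Pre_subsetA_sort (arr : List Int) : Prop := ∃ x ∈ arr, x ≠ 0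
instance (arr : List Int) : Decidable (Pre_subsetA_sort arr) := by unfold Pre_subsetA_sort; infer_instance
def pvWitness_subsetA_sort : List Int := [3, 1, 2]

def Spec_subsetA_sort (arr : List Int) (out : List Int) : Prop := out = subsetA_sort_alt arr
instance (arr : List Int) (out : List Int) : Decidable (Spec_subsetA_sort arr out) := by unfold Spec_subsetA_sort; infer_instance

-- ===== CLAIM (what is proved, stated in full; the proofs are below) =====
def Claim_equal_subsetA_sort : Prop := ∀ (arr : List Int), Dom_subsetA_sort arr → Pre_subsetA_sort arr → Spec_subsetA_sort arr (subsetA_sort arr)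

-- ===== LEMMAS AND PROOFS =====

-- proof-side view of B's loop: the prefix of the descending list it selects
def altTake (total acc : Int) : List Int → List Int
  | [] => []
  | x :: xs => if 2 * acc ≤ total then x :: altTake total (acc + x) xs else []

-- and the cut index it computes
def altCount (total acc : Int) : List Int → Nat
  | [] => 0
  | x :: xs => if 2 * acc ≤ total then altCount total (acc + x) xs + 1 else 0

lemma take_altCount (total acc : Int) (d : List Int) :
    d.take (altCount total acc d) = altTake total acc d := by
  induction d generalizing acc with
  | nil => simp [altCount, altTake]
  | cons x xs ih =>
    simp only [altCount, altTake]
    split_ifs with h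
    · simp [List.take_succ_cons, ih]
    · simp

lemma altGo_eq_altCount (desc : List Int) (total : Int) :
    ∀ (rest : List Int) (acc : Int) (k : Nat), desc.drop k = rest →
    subsetA_altGo desc total acc k = k + altCount total acc rest := by
  intro rest
  induction rest with
  | nil =>
    intro acc k hk
    have hlen : desc.length ≤ k := by
      have := congrArg List.length hk; simp at this; omega
    rw [subsetA_altGo]
    split_ifs with hc
    · split
      · simp [altCount]
      · next v h =>
        rw [PySem.List.pyGet?_natCast, List.getElem?_eq_none hlen] at h
        simp at h
    · simp [altCount]
  | cons x xs ih =>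
    intro acc k hk
    have hklt : k < desc.length := by
      have := congrArg List.length hk; simp at this; omega
    have hd := List.drop_eq_getElem_cons (l := desc) hklt
    rw [hk] at hd
    injection hd with hx hxs
    rw [subsetA_altGo]
    simp only [altCount]
    split_ifs with hc
    · split
      · next h =>
        rw [PySem.List.pyGet?_natCast, List.getElem?_eq_getElem hklt] at h
        simp at h
      · next v h =>
        rw [PySem.List.pyGet?_natCast, List.getElem?_eq_getElem hklt] at h
        injection h with hv
        subst hv
        have := ih (acc + x) (k + 1) hxs.symm
        rw [← hx]
        omega
    · rfl

-- sorted(arr, reverse=True) is the reverse of sorted(arr)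
lemma sorted_rev_eq_reverse (arr : List Int) :
    PySem.List.sorted arr (fun x => x) true = (PySem.List.sorted arr (fun x => x) false).reverse := by
  have h1 : ((PySem.List.sorted arr (fun x => x) true).reverse).Perm
      (PySem.List.sorted arr (fun x => x) false) :=
    ((List.reverse_perm _).trans (PySem.List.sorted_perm arr _ true)).trans
      (PySem.List.sorted_perm arr _ false).symm
  have h2 : ((PySem.List.sorted arr (fun x => x) true).reverse).Pairwise (fun a b => a ≤ b) := by
    rw [List.pairwise_reverse]
    exact PySem.List.sorted_pairwise_rev arr _
  have h3 : (PySem.List.sorted arr (fun x => x) false).Pairwise (fun a b => a ≤ b) :=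
    PySem.List.sorted_pairwise arr _
  have := PySem.List.eq_of_perm_of_pairwise_le_of_injective (fun x => x)
    (fun _ _ h => h) h1 h2 h3
  calc PySem.List.sorted arr (fun x => x) true
      = ((PySem.List.sorted arr (fun x => x) true).reverse).reverse := by simp
    _ = _ := by rw [this]

-- A's loop on d.reverse (popping from the back) computes altTake over d
lemma goA_eq_altTake (d : List Int) :
    ∀ (out : List Int) (asum : Int),
    subsetA_sortGo d.reverse out d.sum asum = out ++ altTake (asum + d.sum) asum d := by
  induction d with
  | nil =>
    intro out asum
    rw [subsetA_sortGo.eq_def]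
    split_ifs with hc
    · split
      · simp [altTake]
      · next pr h =>
        have := PySem.List.length_of_pop?_eq_some _ h
        simp at this
    · simp [altTake]
  | cons x xs ih =>
    intro out asum
    have hpop : PySem.List.pop? (x :: xs).reverse = some (x, xs.reverse) := by
      rw [List.reverse_cons]; exact PySem.List.pop?_last _ _
    rw [subsetA_sortGo.eq_def]
    simp only [List.sum_cons]
    split_ifs with h1
    · split
      · next h => rw [hpop] at h; simp at h
      · next pr h =>
        rw [hpop] at h
        injection h with hpr
        subst hpr
        show subsetA_sortGo xs.reverse (out ++ [x]) (x + xs.sum - x) (asum + x)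
          = out ++ altTake (asum + (x + xs.sum)) asum (x :: xs)
        have hs : x + xs.sum - x = xs.sum := by ring
        rw [hs, ih (out ++ [x]) (asum + x)]
        rw [show asum + x + xs.sum = asum + (x + xs.sum) by ring]
        simp [altTake, show 2 * asum ≤ asum + (x + xs.sum) by omega]
    · simp [altTake, show ¬(2 * asum ≤ asum + (x + xs.sum)) by omega]

-- ===== VERDICT (by name: the statement is the Claim_ definition above) =====
theorem subsetA_sort_spec : Claim_equal_subsetA_sort := by
  intro arr _ _
  unfold Spec_subsetA_sort
  show subsetA_sortGo (PySem.List.sorted arr (fun x => x) false) []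
      (PySem.List.sorted arr (fun x => x) false).sum 0 =
    PySem.List.slice (PySem.List.sorted arr (fun x => x) true) none
      (some ((subsetA_altGo (PySem.List.sorted arr (fun x => x) true) arr.sum 0 0 : Nat) : Int))
  have hasc : PySem.List.sorted arr (fun x => x) false
      = (PySem.List.sorted arr (fun x => x) true).reverse := by
    rw [sorted_rev_eq_reverse]; simp
  have hsum : (PySem.List.sorted arr (fun x => x) true).sum = arr.sum :=
    (PySem.List.sorted_perm arr _ true).sum_eq
  rw [hasc, List.sum_reverse, goA_eq_altTake, hsum,
    altGo_eq_altCount (PySem.List.sorted arr (fun x => x) true) arr.sum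
      (PySem.List.sorted arr (fun x => x) true) 0 0 (by simp), Nat.zero_add,
    PySem.List.slice_to_natCast, take_altCount]
  simp
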